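-- pv_equiv track=rewrite | github.com/posl/comment_recommendation | script/mod_gen/5_time/en/227_C/9.py | solve
-- ===== SOURCE A (Python) =====
-- def solve(N):
--     count = 0
--     for C in range(1, N + 1):
--         for B in range(1, C + 1):
--             A = N // (B * C)
--             if A >= B:
--                 count += 1
--             else:
--                 break
--     return count
-- ===== SOURCE B (Python) =====
-- def solve(N):
--     count = 0
--     for B in range(1, N + 1):
--         if B * B * B > N:
--             break
--         count += N // (B * B) - B + 1
--     return count
-- ===== Notes on version B (the rewrite author's own statement) =====
-- stated objective: faster
-- what changed: A scans every candidate C up to N with an inner loop over B; B instead loops only over the few B whose cube stays within N and adds the size of the interval of admissible C in closed form via one floor division.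
import Mathlib
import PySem

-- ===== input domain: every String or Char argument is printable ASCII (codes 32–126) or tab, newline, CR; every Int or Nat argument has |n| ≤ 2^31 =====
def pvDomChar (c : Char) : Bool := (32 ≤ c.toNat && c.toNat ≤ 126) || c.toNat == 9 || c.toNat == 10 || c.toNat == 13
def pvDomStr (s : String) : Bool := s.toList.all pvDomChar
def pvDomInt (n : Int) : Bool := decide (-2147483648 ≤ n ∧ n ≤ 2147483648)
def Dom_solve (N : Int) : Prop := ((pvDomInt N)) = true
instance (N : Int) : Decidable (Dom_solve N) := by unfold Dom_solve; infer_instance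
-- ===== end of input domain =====

-- B replaces A's scan over every C (with an inner B loop) by a loop over B with B^3 ≤ N,
-- counting the admissible C in closed form; objective: faster (asymptotic, O(N^(1/3)) vs O(N)).

-- ===== PORT A =====
-- inner 'for B in range(1, C+1)' loop with its break: fuel = remaining iterations, B = current value
def solveInner (N C : Int) : Nat → Int → Int → Int
  | 0, _, count => count
  | fuel + 1, B, count =>
      if PySem.Int.floordiv N (B * C) ≥ B then solveInner N C fuel (B + 1) (count + 1)
      else count

def solve (N : Int) : Int :=
  (PySem.List.pyRange 1 (N + 1) 1).foldl
    (fun count C => solveInner N C C.toNat 1 count) 0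

-- ===== PORT B =====
-- 'for B in range(1, N+1)' loop with its break at B*B*B > N
def solveAltLoop (N : Int) : List Int → Int → Int
  | [], count => count
  | B :: rest, count =>
      if B * B * B > N then count
      else solveAltLoop N rest (count + (PySem.Int.floordiv N (B * B) - B + 1))

def solve_alt (N : Int) : Int :=
  solveAltLoop N (PySem.List.pyRange 1 (N + 1) 1) 0

-- ===== PRECONDITION & SPEC =====
def Spec_solve (N : Int) (out : Int) : Prop := out = solve_alt N
instance (N : Int) (out : Int) : Decidable (Spec_solve N out) := by unfold Spec_solve; infer_instance

-- ===== CLAIM (what is proved, stated in full; the proofs are below) =====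
def Claim_equal_solve : Prop := ∀ (N : Int), Dom_solve N → Spec_solve N (solve N)

-- ===== LEMMAS AND PROOFS =====

-- column count: number of B in [1,C] with B*B*C ≤ N
noncomputable def colF (N C : Int) : Int := (((Finset.Icc 1 C).filter (fun B => B * B * C ≤ N)).card : Int)
-- row count: number of C in [1,N] with B ≤ C and B*B*C ≤ N
noncomputable def rowF (N B : Int) : Int := (((Finset.Icc 1 N).filter (fun C => B ≤ C ∧ B * B * C ≤ N)).card : Int)

theorem Icc_cons_bot (a b : Int) (h : a ≤ b) :
    Finset.Icc a b = insert a (Finset.Icc (a + 1) b) := by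
  ext x; simp [Finset.mem_Icc]; omega

theorem Icc_cons_top (a b : Int) (h : a ≤ b) :
    Finset.Icc a b = insert b (Finset.Icc a (b - 1)) := by
  ext x; simp [Finset.mem_Icc]; omega

theorem sq_mul_mono (a B C : Int) (h0 : 0 ≤ a) (h1 : a ≤ B) (h2 : 0 ≤ C) :
    a * a * C ≤ B * B * C := by
  have hs : a * a ≤ B * B := by nlinarith
  exact mul_le_mul_of_nonneg_right hs h2

theorem cube_mono (a B : Int) (h0 : 0 ≤ a) (h1 : a ≤ B) :
    a * a * a ≤ B * B * B := by
  have hs : a * a ≤ B * B := by nlinarith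
  nlinarith

theorem solveInner_acc (N C : Int) (fuel : Nat) (B c : Int) :
    solveInner N C fuel B c = c + solveInner N C fuel B 0 := by
  induction fuel generalizing B c with
  | zero => simp [solveInner]
  | succ fuel ih =>
    simp only [solveInner]
    split
    · rw [ih (B + 1) (c + 1), ih (B + 1) (0 + 1)]; ring
    · ring

theorem cond_iff (N C B : Int) (hB : 1 ≤ B) (hC : 1 ≤ C) :
    (PySem.Int.floordiv N (B * C) ≥ B) ↔ B * B * C ≤ N := by
  have hpos : 0 < B * C := by positivity
  rw [ge_iff_le, PySem.Int.le_floordiv_iff_mul_le hpos]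
  constructor <;> intro h <;> nlinarith

theorem inner_eq (N C : Int) (hC : 1 ≤ C) :
    ∀ n : Nat, ∀ a : Int, 1 ≤ a → (C + 1 - a).toNat = n →
      solveInner N C n a 0
        = (((Finset.Icc a C).filter (fun B => B * B * C ≤ N)).card : Int) := by
  intro n
  induction n with
  | zero =>
    intro a ha hn
    have : Finset.Icc a C = ∅ := Finset.Icc_eq_empty (by omega)
    simp [solveInner, this]
  | succ n ih =>
    intro a ha hn
    have haC : a ≤ C := by omega
    simp only [solveInner]
    rw [Icc_cons_bot a C haC, Finset.filter_insert]
    by_cases hP : a * a * C ≤ N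
    · rw [if_pos ((cond_iff N C a ha hC).mpr hP), solveInner_acc, if_pos hP]
      rw [ih (a + 1) (by omega) (by omega)]
      rw [Finset.card_insert_of_notMem (by simp [Finset.mem_Icc])]
      push_cast; ring
    · rw [if_neg (by rw [cond_iff N C a ha hC]; exact hP), if_neg hP]
      have : (Finset.Icc (a + 1) C).filter (fun B => B * B * C ≤ N) = ∅ := by
        rw [Finset.filter_eq_empty_iff]
        intro B hB
        rw [Finset.mem_Icc] at hB
        intro hBP
        exact hP (le_trans (sq_mul_mono a B C (by omega) (by omega) (by omega)) hBP)
      simp [this]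

theorem solve_eq_sum (N : Int) :
    ∀ M : Int, 0 ≤ M →
      (PySem.List.pyRange 1 (M + 1) 1).foldl
          (fun count C => solveInner N C C.toNat 1 count) 0
        = ∑ C ∈ Finset.Icc 1 M, colF N C := by
  intro M hM
  induction M, hM using Int.le_induction with
  | base =>
    rw [PySem.List.pyRange_one_eq_nil (by omega)]
    simp
  | succ M hM ih =>
    rw [PySem.List.pyRange_one_succ_right (by omega : (1:Int) ≤ M + 1), List.foldl_append]
    simp only [List.foldl]
    rw [solveInner_acc, ih]
    have h2 : solveInner N (M + 1) (M + 1).toNat 1 0 = colF N (M + 1) :=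
      inner_eq N (M + 1) (by omega) (M + 1).toNat 1 le_rfl (by omega)
    rw [h2, Icc_cons_top 1 (M + 1) (by omega)]
    simp only [add_sub_cancel_right]
    rw [Finset.sum_insert (by simp [Finset.mem_Icc])]
    ring

theorem rowF_pos (N B : Int) (hB : 1 ≤ B) (h : B * B * B ≤ N) :
    rowF N B = PySem.Int.floordiv N (B * B) - B + 1 := by
  have hBB : (0:Int) < B * B := by positivity
  have hN : (0:Int) < N := by nlinarith
  rw [rowF, PySem.Int.floordiv_eq_ediv_of_pos hBB]
  set K := N / (B * B) with hK
  have hiff : ∀ C : Int, B * B * C ≤ N ↔ C ≤ K := by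
    intro C
    rw [hK, Int.le_ediv_iff_mul_le hBB]
    constructor <;> intro h <;> nlinarith
  have hBK : B ≤ K := (hiff B).mp (by nlinarith)
  have hKN : K ≤ N := le_trans (Int.ediv_le_self _ hN.le) le_rfl
  have hset : (Finset.Icc 1 N).filter (fun C => B ≤ C ∧ B * B * C ≤ N) = Finset.Icc B K := by
    ext C
    simp only [Finset.mem_filter, Finset.mem_Icc, hiff]
    constructor
    · rintro ⟨⟨_, _⟩, h3, h4⟩; exact ⟨h3, h4⟩
    · rintro ⟨h1, h2⟩; exact ⟨⟨by omega, by omega⟩, h1, h2⟩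
  rw [hset, Int.card_Icc]
  omega

theorem rowF_zero (N B : Int) (hB : 1 ≤ B) (h : N < B * B * B) :
    rowF N B = 0 := by
  rw [rowF]
  have : (Finset.Icc 1 N).filter (fun C => B ≤ C ∧ B * B * C ≤ N) = ∅ := by
    rw [Finset.filter_eq_empty_iff]
    intro C hC
    rw [Finset.mem_Icc] at hC
    rintro ⟨h1, h2⟩
    nlinarith
  simp [this]

theorem alt_eq_sum (N : Int) :
    ∀ n : Nat, ∀ a : Int, 1 ≤ a → (N + 1 - a).toNat = n → ∀ acc : Int,
      solveAltLoop N (PySem.List.pyRange a (N + 1) 1) acc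
        = acc + ∑ B ∈ Finset.Icc a N, rowF N B := by
  intro n
  induction n with
  | zero =>
    intro a ha hn acc
    rw [PySem.List.pyRange_one_eq_nil (by omega)]
    have : Finset.Icc a N = ∅ := Finset.Icc_eq_empty (by omega)
    simp [solveAltLoop, this]
  | succ n ih =>
    intro a ha hn acc
    have haN : a ≤ N := by omega
    rw [PySem.List.pyRange_one_cons (by omega : a < N + 1)]
    simp only [solveAltLoop]
    by_cases hc : a * a * a > N
    · rw [if_pos hc]
      have hz : ∑ B ∈ Finset.Icc a N, rowF N B = 0 := by
        apply Finset.sum_eq_zero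
        intro B hB
        rw [Finset.mem_Icc] at hB
        exact rowF_zero N B (by omega)
          (lt_of_lt_of_le hc (cube_mono a B (by omega) hB.1))
      rw [hz]; ring
    · rw [if_neg hc, ih (a + 1) (by omega) (by omega)]
      rw [Icc_cons_bot a N haN, Finset.sum_insert (by simp [Finset.mem_Icc])]
      rw [rowF_pos N a ha (by omega)]
      ring

theorem sums_eq (N : Int) :
    ∑ C ∈ Finset.Icc 1 N, colF N C = ∑ B ∈ Finset.Icc 1 N, rowF N B := by
  have hcol : ∀ C ∈ Finset.Icc 1 N, colF N C
      = (((Finset.Icc 1 N).filter (fun B => B ≤ C ∧ B * B * C ≤ N)).card : Int) := by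
    intro C hC
    rw [Finset.mem_Icc] at hC
    rw [colF]
    congr 2
    ext B
    simp only [Finset.mem_filter, Finset.mem_Icc]
    constructor
    · rintro ⟨⟨h1, h2⟩, h3⟩; exact ⟨⟨h1, by omega⟩, h2, h3⟩
    · rintro ⟨⟨h1, _⟩, h2, h3⟩; exact ⟨⟨h1, h2⟩, h3⟩
  rw [Finset.sum_congr rfl hcol]
  simp only [rowF, Finset.card_filter]
  push_cast
  rw [Finset.sum_comm]

-- ===== VERDICT (by name: the statement is the Claim_ definition above) =====
theorem solve_spec : Claim_equal_solve := by
  intro N _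
  unfold Spec_solve solve solve_alt
  by_cases hN : 0 ≤ N
  · rw [solve_eq_sum N N hN, alt_eq_sum N (N + 1 - 1).toNat 1 le_rfl rfl 0, sums_eq]
    ring
  · rw [PySem.List.pyRange_one_eq_nil (by omega)]
    simp [solveAltLoop]
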